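-- pv_equiv track=rewrite | github.com/GouriVarma/hellopython | pyramidsum2.py | pyramidsum
-- ===== SOURCE A (Python) =====
-- def pyramidsum(arr):
--
--   while len(arr)>1:
--     new_arr = []
--     for i in range(len(arr)-1):
--       new_arr.append(arr[i]+arr[i+1])
--     arr = new_arr
--   if arr:
--    return arr[0]
--   else:
--    return 0
-- ===== SOURCE B (Python) =====
-- def pyramidsum(arr):
--     # Closed form: the pyramid top is sum of C(n-1,i)*arr[i]; binomials computed incrementally.
--     n = len(arr)
--     total, c = 0, 1
--     for i, x in enumerate(arr):
--         total += c * x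
--         c = c * (n - 1 - i) // (i + 1)
--     return total
-- ===== Notes on version B (the rewrite author's own statement) =====
-- stated objective: faster
-- what changed: Replaces the quadratic repeated adjacent-pair-sum collapse with a single pass computing the closed form sum of C(n-1,i)*arr[i], maintaining the binomial coefficient incrementally.
import Mathlib
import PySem

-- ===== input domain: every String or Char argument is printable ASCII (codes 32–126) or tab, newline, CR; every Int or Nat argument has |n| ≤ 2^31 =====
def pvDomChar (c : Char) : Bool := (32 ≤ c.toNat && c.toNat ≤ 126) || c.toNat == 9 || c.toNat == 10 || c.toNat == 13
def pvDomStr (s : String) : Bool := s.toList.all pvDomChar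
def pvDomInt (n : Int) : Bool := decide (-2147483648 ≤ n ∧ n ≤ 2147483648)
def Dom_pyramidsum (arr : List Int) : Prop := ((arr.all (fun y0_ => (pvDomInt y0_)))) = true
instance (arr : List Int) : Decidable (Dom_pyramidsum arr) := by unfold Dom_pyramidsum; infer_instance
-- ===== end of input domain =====

-- B replaces A's quadratic repeated adjacent-pair collapse by a one-pass binomial-weighted sum (asymptotically faster).


-- ===== PORT A =====
-- one pass of A's while body: new_arr built by appending arr[i]+arr[i+1] for i in range(len(arr)-1)
def pyramidStep (arr : List Int) : List Int :=
  (PySem.List.pyRange 0 ((arr.length : Int) - 1) 1).foldl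
    (fun acc i => acc ++ [PySem.List.pyGetD arr i 0 + PySem.List.pyGetD arr (i + 1) 0]) []

-- characterisation of one pass (cited by the port's termination proof via pyramidStep_length)
theorem pyramidStep_eq_map (arr : List Int) :
    pyramidStep arr
      = (List.range (arr.length - 1)).map (fun k => arr.getD k 0 + arr.getD (k + 1) 0) := by
  unfold pyramidStep
  rw [PySem.List.foldl_append_singleton_eq_map, PySem.List.pyRange_one]
  have h : ((arr.length : Int) - 1 - 0).toNat = arr.length - 1 := by omega
  simp only [List.nil_append, List.map_map, h]
  apply List.map_congr_left
  intro k hk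
  simp only [Function.comp_apply]
  have h1 : (k : Int) + 1 = (((k + 1 : ℕ)) : Int) := by push_cast; ring
  simp only [zero_add, h1]
  rw [PySem.List.pyGetD_natCast, PySem.List.pyGetD_natCast]

theorem pyramidStep_length (arr : List Int) :
    (pyramidStep arr).length = arr.length - 1 := by
  rw [pyramidStep_eq_map]; simp

def pyramidsum (arr : List Int) : Int :=
  if arr.length > 1 then
    pyramidsum (pyramidStep arr)
  else
    match arr with
    | [] => 0
    | x :: _ => x
termination_by arr.length
decreasing_by simp [pyramidStep_length]; omega

-- ===== PORT B =====
def pyramidsum_alt (arr : List Int) : Int :=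
  let n : Int := arr.length
  ((PySem.List.enumerate arr 0).foldl
    (fun (s : Int × Int) p =>
      (s.1 + s.2 * p.2, PySem.Int.floordiv (s.2 * (n - 1 - p.1)) (p.1 + 1)))
    (0, 1)).1

-- ===== PRECONDITION & SPEC =====
def Spec_pyramidsum (arr : List Int) (out : Int) : Prop := out = pyramidsum_alt arr
instance (arr : List Int) (out : Int) : Decidable (Spec_pyramidsum arr out) := by unfold Spec_pyramidsum; infer_instance

-- ===== CLAIM (what is proved, stated in full; the proofs are below) =====
def Claim_equal_pyramidsum : Prop := ∀ (arr : List Int), Dom_pyramidsum arr → Spec_pyramidsum arr (pyramidsum arr)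

-- ===== LEMMAS AND PROOFS =====

-- the binomial-weighted sum both programs compute
def wsum (xs : List Int) : Int :=
  ∑ i ∈ Finset.range xs.length, ((xs.length - 1).choose i : Int) * xs.getD i 0

-- Pascal shift: one collapse step preserves the weighted sum
theorem pascal_shift (m : ℕ) (g : ℕ → ℤ) :
    ∑ i ∈ Finset.range (m + 1), (m.choose i : ℤ) * (g i + g (i + 1))
      = ∑ i ∈ Finset.range (m + 2), ((m + 1).choose i : ℤ) * g i := by
  have h0 : ∑ i ∈ Finset.range (m + 1), (m.choose i : ℤ) * (g i + g (i + 1))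
      = (∑ i ∈ Finset.range (m + 1), (m.choose i : ℤ) * g i)
        + ∑ i ∈ Finset.range (m + 1), (m.choose i : ℤ) * g (i + 1) := by
    simp [mul_add, Finset.sum_add_distrib]
  have h1 : ∑ i ∈ Finset.range (m + 2), ((m + 1).choose i : ℤ) * g i
      = (∑ i ∈ Finset.range (m + 1), (m.choose i : ℤ) * g (i + 1))
        + (∑ i ∈ Finset.range (m + 1), (m.choose (i + 1) : ℤ) * g (i + 1)) + g 0 := by
    rw [Finset.sum_range_succ']
    simp [Nat.choose_succ_succ, add_mul, Finset.sum_add_distrib]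
    try ring
  have h2 : ∑ i ∈ Finset.range (m + 2), (m.choose i : ℤ) * g i
      = (∑ i ∈ Finset.range (m + 1), (m.choose (i + 1) : ℤ) * g (i + 1)) + g 0 := by
    rw [Finset.sum_range_succ']
    simp
  have h3 : ∑ i ∈ Finset.range (m + 2), (m.choose i : ℤ) * g i
      = ∑ i ∈ Finset.range (m + 1), (m.choose i : ℤ) * g i := by
    rw [Finset.sum_range_succ]
    simp
  linarith

theorem wsum_step (arr : List Int) (h : 1 < arr.length) :
    wsum (pyramidStep arr) = wsum arr := by
  obtain ⟨m, hm⟩ : ∃ m, arr.length = m + 2 := ⟨arr.length - 2, by omega⟩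
  rw [pyramidStep_eq_map]
  unfold wsum
  rw [List.length_map, List.length_range, hm]
  have hlen : m + 2 - 1 = m + 1 := by omega
  have hlen2 : m + 1 - 1 = m := by omega
  rw [hlen, hlen2]
  rw [← pascal_shift m (fun k => arr.getD k 0)]
  apply Finset.sum_congr rfl
  intro i hi
  simp at hi
  congr 1
  rw [List.getD_eq_getElem _ _ (by simpa using hi)]
  simp

theorem pyramidsum_eq_wsum (arr : List Int) : pyramidsum arr = wsum arr := by
  by_cases h : 1 < arr.length
  · rw [pyramidsum.eq_def, if_pos h, pyramidsum_eq_wsum (pyramidStep arr), wsum_step arr h]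
  · rw [pyramidsum.eq_def, if_neg h]
    match arr with
    | [] => simp [wsum]
    | [x] => simp [wsum]
    | x :: y :: t => simp at h
termination_by arr.length
decreasing_by simp [pyramidStep_length]; omega

-- B-side loop invariant: after j items the carried coefficient is C(N-1, j)
theorem foldB_inv (N : ℕ) (ys : List Int) (j : ℕ) (hj : j + ys.length = N) (t : Int) :
    ((PySem.List.enumerate ys (j : Int)).foldl
      (fun (s : Int × Int) p =>
        (s.1 + s.2 * p.2, PySem.Int.floordiv (s.2 * ((N : Int) - 1 - p.1)) (p.1 + 1)))
      (t, ((N - 1).choose j : Int))).1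
    = t + ∑ i ∈ Finset.range ys.length, ((N - 1).choose (j + i) : Int) * ys.getD i 0 := by
  induction ys generalizing j t with
  | nil => simp [PySem.List.enumerate]
  | cons y ys ih =>
    rw [PySem.List.enumerate_cons, List.foldl_cons]
    have hstep : PySem.Int.floordiv (((N - 1).choose j : Int) * ((N : Int) - 1 - (j : Int))) ((j : Int) + 1)
        = ((N - 1).choose (j + 1) : Int) := by
      have hcast : (N : Int) - 1 - (j : Int) = ((N - 1 - j : ℕ) : Int) := by
        simp only [List.length_cons] at hj; omega
      rw [hcast]
      have hmul : ((N - 1).choose j : Int) * ((N - 1 - j : ℕ) : Int)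
          = (((N - 1).choose j * (N - 1 - j) : ℕ) : Int) := by push_cast; ring
      have hjj : ((j : Int) + 1) = ((j + 1 : ℕ) : Int) := by push_cast; ring
      rw [hmul, hjj, PySem.Int.floordiv_natCast]
      congr 1
      rw [← Nat.choose_succ_right_eq]
      exact Nat.mul_div_cancel _ (Nat.succ_pos j)
    rw [hstep]
    have hcons : ((j : Int) + 1) = ((j + 1 : ℕ) : Int) := by push_cast; ring
    rw [hcons, ih (j + 1) (by simp only [List.length_cons] at hj; omega)]
    have hsum : ∑ i ∈ Finset.range ys.length, ((N - 1).choose (j + 1 + i) : ℤ) * ys.getD i 0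
        = ∑ i ∈ Finset.range ys.length, ((N - 1).choose (j + (i + 1)) : ℤ) * ys.getD i 0 := by
      apply Finset.sum_congr rfl
      intro i _
      have hidx : j + 1 + i = j + (i + 1) := by omega
      rw [hidx]
    rw [hsum, show (y :: ys).length = ys.length + 1 from rfl, Finset.sum_range_succ']
    simp only [List.getD_cons_succ, List.getD_cons_zero, Nat.add_zero]
    ring

-- ===== VERDICT (by name: the statement is the Claim_ definition above) =====
theorem pyramidsum_spec : Claim_equal_pyramidsum := by
  intro arr _
  unfold Spec_pyramidsum pyramidsum_alt
  have h0 : ((0 : ℕ) : Int) = (0 : Int) := rfl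
  have := foldB_inv arr.length arr 0 (by omega) 0
  rw [h0] at this
  simp only [Nat.choose_zero_right, Nat.cast_one] at this
  rw [this, pyramidsum_eq_wsum]
  unfold wsum
  simp
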